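-- pv_equiv track=rewrite | github.com/prayush21/learning-random-signals-and-systems | module-2/combinatorics_examples.py | binomial_expansion_string
-- ===== SOURCE A (Python) =====
-- import math
--
-- def combinations(n, r):
--   """
--   Calculates the number of combinations of r objects from a set of n objects.
--   """
--   if r < 0 or r > n:
--       return 0
--   return math.factorial(n) // (math.factorial(r) * math.factorial(n - r))
--
-- def binomial_expansion_string(n):
--     """
--     Returns the string representation of the expansion of (x+y)^n.
--     """
--     expansion = []
--     for r in range(n + 1):
--         coeff = combinations(n, r)
--
--         # Handle coefficient
--         if coeff == 1 and n != 0: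
--             coeff_str = ""
--         else:
--             coeff_str = str(coeff)
--
--         # Handle x term
--         if n - r > 0:
--             if n - r == 1:
--                 x_term = "x"
--             else:
--                 x_term = f"x^{n-r}"
--         else:
--             x_term = ""
--
--         # Handle y term
--         if r > 0:
--             if r == 1:
--                 y_term = "y"
--             else:
--                 y_term = f"y^{r}"
--         else:
--             y_term = ""
--
--         # Join terms
--         term_parts = [part for part in [coeff_str, x_term, y_term] if part]
--         term = "".join(term_parts)
--
--         # Handle case where term is just a number (e.g., for (x+y)^0)
--         if not term and coeff_str:
--             term = coeff_str
--
--         expansion.append(term)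
--
--     return " + ".join(expansion)
-- ===== SOURCE B (Python) =====
-- def binomial_expansion_string(n):
--     """
--     Returns the string representation of the expansion of (x+y)^n,
--     computing each binomial coefficient from the previous one by
--     C(n, r+1) = C(n, r) * (n - r) // (r + 1)  (one pass, no factorials).
--     """
--     if n < 0:
--         return ""
--     if n == 0:
--         return "1"
--     parts = []
--     c = 1
--     for r in range(n + 1):
--         p = "" if c == 1 else str(c)
--         k = n - r
--         if k == 1:
--             p += "x"
--         elif k > 1:
--             p += "x^" + str(k)
--         if r == 1:
--             p += "y"
--         elif r > 1:
--             p += "y^" + str(r)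
--         parts.append(p)
--         c = c * (n - r) // (r + 1)
--     return " + ".join(parts)
-- ===== Notes on version B (the rewrite author's own statement) =====
-- stated objective: alternative
-- what changed: B replaces the per-term factorial formula C(n,r)=n!/(r!(n-r)!) by the incremental Pascal-style update C(n,r+1)=C(n,r)*(n-r)//(r+1) carried through one pass, handles the degenerate cases by early return, and builds each term by direct string concatenation instead of A's filter-and-join of term parts.
import Mathlib
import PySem

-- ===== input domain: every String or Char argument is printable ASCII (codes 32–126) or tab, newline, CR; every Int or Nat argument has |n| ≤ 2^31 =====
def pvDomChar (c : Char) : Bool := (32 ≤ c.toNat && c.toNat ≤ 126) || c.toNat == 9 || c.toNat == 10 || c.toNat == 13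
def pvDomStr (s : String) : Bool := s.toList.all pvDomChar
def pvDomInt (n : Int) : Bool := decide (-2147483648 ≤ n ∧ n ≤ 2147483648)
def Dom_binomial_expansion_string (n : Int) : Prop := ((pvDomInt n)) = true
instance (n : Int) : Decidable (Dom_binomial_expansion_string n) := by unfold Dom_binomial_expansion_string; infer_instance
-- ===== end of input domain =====

-- B computes each binomial coefficient from the previous one (C(n,r+1)=C(n,r)*(n-r)//(r+1))
-- instead of A's per-term factorial formula, and builds each term by plain concatenation
-- instead of A's filter-and-join of parts (objective: alternative algorithm).


-- ===== PORT A =====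
-- math.factorial is exact here: the guard ensures 0 ≤ r ≤ n before any factorial is taken.
def combinations (n r : Int) : Int :=
  if r < 0 ∨ r > n then 0
  else PySem.Int.floordiv (Nat.factorial n.toNat : Int) ((Nat.factorial r.toNat : Int) * (Nat.factorial (n - r).toNat : Int))

-- the body of A's loop, factored as a helper (one iteration produces this term)
def termA (n r : Int) : String :=
  let coeff := combinations n r
  let coeff_str := if coeff = 1 ∧ n ≠ 0 then "" else PySem.Int.toStr coeff
  let x_term := if n - r > 0 then (if n - r = 1 then "x" else "x^" ++ PySem.Int.toStr (n - r)) else ""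
  let y_term := if r > 0 then (if r = 1 then "y" else "y^" ++ PySem.Int.toStr r) else ""
  let term_parts := [coeff_str, x_term, y_term].filter (fun p => p ≠ "")
  let term := PySem.Str.join "" term_parts
  if term = "" ∧ coeff_str ≠ "" then coeff_str else term

def binomial_expansion_string (n : Int) : String :=
  let expansion : List String :=
    (PySem.List.pyRange 0 (n + 1) 1).foldl (fun acc r => acc ++ [termA n r]) []
  PySem.Str.join " + " expansion

-- ===== PORT B =====
-- one term of B, built by concatenation from the running coefficient c
def termB (n c r : Int) : String :=
  let p := if c = 1 then "" else PySem.Int.toStr c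
  let k := n - r
  let p := if k = 1 then p ++ "x" else if k > 1 then p ++ "x^" ++ PySem.Int.toStr k else p
  if r = 1 then p ++ "y" else if r > 1 then p ++ "y^" ++ PySem.Int.toStr r else p

-- one iteration of B's loop: append the term, update c by c*(n-r)//(r+1)
def stepB (n : Int) (st : List String × Int) (r : Int) : List String × Int :=
  (st.1 ++ [termB n st.2 r], PySem.Int.floordiv (st.2 * (n - r)) (r + 1))

def binomial_expansion_string_alt (n : Int) : String :=
  if n < 0 then ""
  else if n = 0 then "1"
  else PySem.Str.join " + " (((PySem.List.pyRange 0 (n + 1) 1).foldl (stepB n) ([], 1)).1)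

-- ===== PRECONDITION & SPEC =====
def Spec_binomial_expansion_string (n : Int) (out : String) : Prop := out = binomial_expansion_string_alt n
instance (n : Int) (out : String) : Decidable (Spec_binomial_expansion_string n out) := by unfold Spec_binomial_expansion_string; infer_instance

-- ===== CLAIM (what is proved, stated in full; the proofs are below) =====
def Claim_equal_binomial_expansion_string : Prop := ∀ (n : Int), Dom_binomial_expansion_string n → Spec_binomial_expansion_string n (binomial_expansion_string n)

-- ===== LEMMAS AND PROOFS =====

-- B's incremental update reproduces the binomial coefficient
theorem choose_step (N r : Nat) :
    PySem.Int.floordiv ((Nat.choose N r : Int) * ((N : Int) - (r : Int))) ((r : Int) + 1)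
      = (Nat.choose N (r + 1) : Int) := by
  by_cases h : r ≤ N
  · have hsub : (N : Int) - (r : Int) = ((N - r : Nat) : Int) := by
      push_cast [h]; ring
    rw [hsub]
    have : (Nat.choose N r : Int) * ((N - r : Nat) : Int) = ((Nat.choose N r * (N - r) : Nat) : Int) := by
      push_cast; ring
    rw [this]
    have h1 : ((r : Int) + 1) = ((r + 1 : Nat) : Int) := by push_cast; ring
    rw [h1, PySem.Int.floordiv_natCast]
    rw [← Nat.choose_succ_right_eq]
    rw [Nat.mul_div_cancel _ (Nat.succ_pos r)]
  · rw [Nat.choose_eq_zero_of_lt (by omega), Nat.choose_eq_zero_of_lt (by omega)]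
    simp only [Nat.cast_zero, zero_mul]
    rw [PySem.Int.floordiv_eq_ediv_of_pos (by positivity)]
    simp

-- A's factorial formula equals the binomial coefficient
theorem comb_eq_choose (N r : Nat) (hr : r ≤ N) :
    combinations (N : Int) (r : Int) = (Nat.choose N r : Int) := by
  unfold combinations
  rw [if_neg (by omega)]
  have h1 : ((N : Int)).toNat = N := by omega
  have h2 : ((r : Int)).toNat = r := by omega
  have h3 : ((N : Int) - (r : Int)).toNat = N - r := by omega
  rw [h1, h2, h3]
  have h4 : (Nat.factorial r : Int) * (Nat.factorial (N - r) : Int)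
      = ((Nat.factorial r * Nat.factorial (N - r) : Nat) : Int) := by push_cast; ring
  rw [h4, PySem.Int.floordiv_natCast]
  rw [Nat.choose_eq_factorial_div_factorial hr]

-- "".join of the non-empty parts is plain concatenation
theorem joinFilter3 (a b c : String) :
    PySem.Str.join "" (([a, b, c].filter (fun p => p ≠ ""))) = a ++ b ++ c := by
  by_cases ha : a = "" <;> by_cases hb : b = "" <;> by_cases hc : c = "" <;>
    subst_vars <;>
    simp [PySem.Str.join, PySem.Chars.join_cons_cons, PySem.Chars.join_singleton,
      PySem.Chars.join_nil, *] <;>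
    apply String.toList_injective <;> simp

theorem tdc_len (b : Nat) : ∀ (f : Nat) (n : Nat) (l : List Char),
    l.length ≤ (Nat.toDigitsCore b f n l).length := by
  intro f
  induction f with
  | zero => intro n l; simp [Nat.toDigitsCore]
  | succ f ih =>
    intro n l
    simp only [Nat.toDigitsCore]
    split
    · simp
    · calc l.length ≤ (Nat.digitChar (n % b) :: l).length := by simp
        _ ≤ _ := ih _ _

theorem toDigits_ne_nil (b n : Nat) : Nat.toDigits b n ≠ [] := by
  unfold Nat.toDigits
  simp only [Nat.toDigitsCore]
  split
  · simp
  · intro h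
    have := tdc_len b n (n / b) [Nat.digitChar (n % b)]
    rw [h] at this
    simp at this

-- str(m) is never the empty string
theorem toStr_ne_empty (m : Int) : PySem.Int.toStr m ≠ "" := by
  intro h
  have := congrArg String.toList h
  rw [PySem.Int.toList_toStr] at this
  simp [PySem.Int.toChars] at this
  split at this
  · simp at this
  · exact toDigits_ne_nil 10 m.toNat this

theorem append_ne_empty_left (a b : String) (h : a ≠ "") : a ++ b ≠ "" := by
  intro hab
  apply h
  apply String.toList_injective
  have := congrArg String.toList hab
  simp at this
  simp [this.1]

theorem append2_toStr_ne (m : Int) (a b : String) : ¬(PySem.Int.toStr m ++ a ++ b = "") :=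
  append_ne_empty_left _ _ (append_ne_empty_left _ _ (toStr_ne_empty m))

-- per-term agreement for n ≥ 1
theorem term_eq (N r : Nat) (hN : 1 ≤ N) (hr : r ≤ N) :
    termA (N : Int) (r : Int) = termB (N : Int) (Nat.choose N r : Int) (r : Int) := by
  unfold termA termB
  dsimp only
  rw [comb_eq_choose N r hr, joinFilter3]
  have hn0 : ((N : Int)) ≠ 0 := by omega
  by_cases hc : (Nat.choose N r : Int) = 1
  · rw [if_pos (show (Nat.choose N r : Int) = 1 ∧ (N : Int) ≠ 0 from ⟨hc, hn0⟩), if_pos hc]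
    rw [if_neg (show ¬((("" ++ (if (N : Int) - (r : Int) > 0 then (if (N : Int) - (r : Int) = 1 then "x" else "x^" ++ PySem.Int.toStr ((N : Int) - (r : Int))) else "")) ++ (if (r : Int) > 0 then (if (r : Int) = 1 then "y" else "y^" ++ PySem.Int.toStr (r : Int)) else "")) = "" ∧ ("" : String) ≠ "") from fun h => h.2 rfl)]
    split_ifs <;> first
      | omega
      | (apply String.toList_injective; simp)
  · rw [if_neg (show ¬((Nat.choose N r : Int) = 1 ∧ (N : Int) ≠ 0) from fun h => hc h.1),
      if_neg hc]
    rw [if_neg (show ¬(((PySem.Int.toStr (Nat.choose N r : Int) ++ (if (N : Int) - (r : Int) > 0 then (if (N : Int) - (r : Int) = 1 then "x" else "x^" ++ PySem.Int.toStr ((N : Int) - (r : Int))) else "")) ++ (if (r : Int) > 0 then (if (r : Int) = 1 then "y" else "y^" ++ PySem.Int.toStr (r : Int)) else "")) = "" ∧ PySem.Int.toStr (Nat.choose N r : Int) ≠ "") from fun h => append2_toStr_ne _ _ _ h.1)]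
    split_ifs <;> first
      | omega
      | (apply String.toList_injective; simp)

-- B's loop invariant: after processing 0..m-1 the terms are done and c = C(N,m)
theorem foldB (N : Nat) : ∀ (m : Nat),
    (PySem.List.pyRange 0 (m : Int) 1).foldl (stepB (N : Int)) ([], 1)
      = ((List.range m).map (fun k => termB (N : Int) (Nat.choose N k : Int) (k : Int)), (Nat.choose N m : Int)) := by
  intro m
  induction m with
  | zero => simp [PySem.List.pyRange_one_eq_nil (le_refl (0 : Int))]
  | succ m ih =>
    have hcast : ((m + 1 : Nat) : Int) = (m : Int) + 1 := by push_cast; ring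
    rw [hcast, PySem.List.pyRange_one_succ_right (by positivity), List.foldl_append, ih]
    simp only [List.foldl_cons, List.foldl_nil, stepB]
    rw [List.range_succ, List.map_append, choose_step]
    simp

theorem main_eq (n : Int) : binomial_expansion_string n = binomial_expansion_string_alt n := by
  by_cases hneg : n < 0
  · unfold binomial_expansion_string binomial_expansion_string_alt
    rw [if_pos hneg, PySem.List.pyRange_one_eq_nil (by omega)]
    dsimp only [List.foldl]
    simp [PySem.Str.join, PySem.Chars.join_nil]
  · by_cases hzero : n = 0
    · subst hzero; decide
    · have hN1 : 1 ≤ n.toNat := by omega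
      have hn : ((n.toNat : Nat) : Int) = n := by omega
      set N := n.toNat with hNdef
      unfold binomial_expansion_string binomial_expansion_string_alt
      rw [if_neg hneg, if_neg hzero]
      rw [← hn, PySem.List.foldl_append_singleton_eq_map]
      have hfb := foldB N (N + 1)
      rw [show ((N + 1 : Nat) : Int) = (N : Int) + 1 from by push_cast; ring] at hfb
      rw [hfb]
      simp only [List.nil_append]
      congr 1
      have hr : ((N : Int) + 1) = ((N + 1 : Nat) : Int) := by push_cast; ring
      rw [hr, PySem.List.pyRange_zero_natCast]
      rw [List.map_map]
      apply List.map_congr_left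
      intro k hk
      have hk' : k ≤ N := by simpa using Nat.lt_succ_iff.mp (List.mem_range.mp hk)
      simpa using term_eq N k hN1 hk'

-- ===== VERDICT (by name: the statement is the Claim_ definition above) =====
theorem binomial_expansion_string_spec : Claim_equal_binomial_expansion_string := by
  intro n _
  exact main_eq n
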